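-- pv_equiv track=rewrite | github.com/xxibcill/cc-deep-reasearch | src/cc_deep_research/agents/research_lead.py | _infer_source_classes
-- ===== SOURCE A (Python) =====
-- def _infer_source_classes(
--
--     query: str,
--     words: list[str],
--     intent: str,
--     is_time_sensitive: bool,
-- ) -> list[str]:
--     """Infer likely source classes needed to answer the query well."""
--     lowered = query.lower()
--     academic_terms = {
--         "academic",
--         "clinical",
--         "journal",
--         "meta-analysis",
--         "paper",
--         "papers",
--         "peer",
--         "peer-reviewed",
--         "research",
--         "scholar",
--         "science",
--         "scientific",
--         "study",
--         "studies",
--         "trial",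
--     }
--     official_terms = {
--         "agency",
--         "compliance",
--         "court",
--         "fda",
--         "filing",
--         "filings",
--         "government",
--         "guidance",
--         "law",
--         "legal",
--         "official",
--         "policy",
--         "regulation",
--         "regulations",
--         "regulator",
--         "rule",
--         "rules",
--         "sec",
--         "standard",
--         "standards",
--     }
--     market_terms = {
--         "earnings",
--         "equity",
--         "finance",
--         "financial",
--         "forecast",
--         "industry",
--         "investment",
--         "investor",
--         "market",
--         "pricing",
--         "revenue",
--         "stock",
--         "trade",
--         "valuation",
--     }
--
--     target_source_classes: list[str] = []
--
--     def add_source_class(name: str) -> None: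
--         if name not in target_source_classes:
--             target_source_classes.append(name)
--
--     if is_time_sensitive:
--         add_source_class("news")
--     if intent == "evidence-seeking" or any(term in lowered for term in academic_terms):
--         add_source_class("academic")
--     if any(term in lowered for term in official_terms):
--         add_source_class("official_docs")
--     if any(term in lowered for term in market_terms):
--         add_source_class("market_analysis")
--     if intent == "comparative":
--         add_source_class("official_docs")
--         add_source_class("market_analysis")
--     if not target_source_classes:
--         add_source_class("official_docs" if len(words) <= 4 else "news")
--
--     return target_source_classes
-- ===== SOURCE B (Python) =====
-- # Merged term->class index scanned once, replacing three separate any() scans;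
-- # classes are recorded at the first matching term, then intent/time flags adjust the list.
-- _SOURCE_CLASS_INDEX = {}
-- for _cls, _terms in (
--     ("academic", (
--         "academic", "clinical", "journal", "meta-analysis", "paper", "papers",
--         "peer", "peer-reviewed", "research", "scholar", "science", "scientific",
--         "study", "studies", "trial",
--     )),
--     ("official_docs", (
--         "agency", "compliance", "court", "fda", "filing", "filings",
--         "government", "guidance", "law", "legal", "official", "policy",
--         "regulation", "regulations", "regulator", "rule", "rules", "sec",
--         "standard", "standards",
--     )),
--     ("market_analysis", (
--         "earnings", "equity", "finance", "financial", "forecast", "industry",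
--         "investment", "investor", "market", "pricing", "revenue", "stock",
--         "trade", "valuation",
--     )),
-- ):
--     for _term in _terms:
--         _SOURCE_CLASS_INDEX[_term] = _cls
--
--
-- def _infer_source_classes(
--     query: str,
--     words: list[str],
--     intent: str,
--     is_time_sensitive: bool,
-- ) -> list[str]:
--     """Infer likely source classes needed to answer the query well."""
--     lowered = query.lower()
--     hits: list[str] = []
--     for term, cls in _SOURCE_CLASS_INDEX.items():
--         if cls not in hits and term in lowered:
--             hits.append(cls)
--     if intent == "evidence-seeking" and "academic" not in hits:
--         hits.insert(0, "academic")
--     if is_time_sensitive: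
--         hits.insert(0, "news")
--     if intent == "comparative":
--         for cls in ("official_docs", "market_analysis"):
--             if cls not in hits:
--                 hits.append(cls)
--     return hits or ["official_docs" if len(words) <= 4 else "news"]
-- ===== Notes on version B (the rewrite author's own statement) =====
-- stated objective: alternative
-- what changed: Replaced A's three independent any() scans over separate term sets plus the membership-appending add_source_class helper by one merged term-to-class index dict scanned in a single pass (each class recorded at its first matching term), with the intent/time flags handled afterwards by explicit list surgery (prepends and conditional appends).
import Mathlib
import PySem

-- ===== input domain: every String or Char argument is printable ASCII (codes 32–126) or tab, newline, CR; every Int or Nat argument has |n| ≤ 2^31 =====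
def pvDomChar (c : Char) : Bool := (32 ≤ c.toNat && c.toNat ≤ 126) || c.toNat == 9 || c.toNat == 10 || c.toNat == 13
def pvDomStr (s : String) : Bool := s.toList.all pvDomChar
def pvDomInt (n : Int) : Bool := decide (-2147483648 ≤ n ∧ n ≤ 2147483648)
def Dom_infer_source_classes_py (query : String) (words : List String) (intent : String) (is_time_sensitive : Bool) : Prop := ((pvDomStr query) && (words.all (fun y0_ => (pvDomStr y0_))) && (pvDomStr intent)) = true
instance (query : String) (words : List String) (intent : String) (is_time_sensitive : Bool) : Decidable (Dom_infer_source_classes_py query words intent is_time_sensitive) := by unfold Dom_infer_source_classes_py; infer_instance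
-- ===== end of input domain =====

-- B replaces A's three independent any() scans plus the membership-appending helper by ONE
-- merged term→class index scanned once (first matching term records its class), followed by
-- list surgery (prepends/appends) for the intent/time flags; objective: alternative.

def pvAcademicTerms : List String :=
  ["academic", "clinical", "journal", "meta-analysis", "paper", "papers",
   "peer", "peer-reviewed", "research", "scholar", "science", "scientific",
   "study", "studies", "trial"]

def pvOfficialTerms : List String :=
  ["agency", "compliance", "court", "fda", "filing", "filings",
   "government", "guidance", "law", "legal", "official", "policy",
   "regulation", "regulations", "regulator", "rule", "rules", "sec",
   "standard", "standards"]

def pvMarketTerms : List String :=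
  ["earnings", "equity", "finance", "financial", "forecast", "industry",
   "investment", "investor", "market", "pricing", "revenue", "stock",
   "trade", "valuation"]

-- ===== PORT A =====
-- `add_source_class`: append unless already present
def pvAddSourceClass (xs : List String) (name : String) : List String :=
  if xs.contains name then xs else xs ++ [name]

def infer_source_classes_py (query : String) (words : List String) (intent : String) (is_time_sensitive : Bool) : List String :=
  let lowered := PySem.Str.lower query
  let t0 : List String := []
  let t1 := if is_time_sensitive then pvAddSourceClass t0 "news" else t0
  let t2 := if intent == "evidence-seeking" || pvAcademicTerms.any (fun term => PySem.Str.isIn term lowered)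
            then pvAddSourceClass t1 "academic" else t1
  let t3 := if pvOfficialTerms.any (fun term => PySem.Str.isIn term lowered)
            then pvAddSourceClass t2 "official_docs" else t2
  let t4 := if pvMarketTerms.any (fun term => PySem.Str.isIn term lowered)
            then pvAddSourceClass t3 "market_analysis" else t3
  let t5 := if intent == "comparative"
            then pvAddSourceClass (pvAddSourceClass t4 "official_docs") "market_analysis" else t4
  if t5 = [] then
    pvAddSourceClass t5 (if words.length ≤ 4 then "official_docs" else "news")
  else t5

-- ===== PORT B =====
-- the module-level `_SOURCE_CLASS_INDEX` dict: term → class, insertion order by class group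
def pvSourceClassIndex : List (String × String) :=
  pvAcademicTerms.map (fun t => (t, "academic"))
    ++ pvOfficialTerms.map (fun t => (t, "official_docs"))
    ++ pvMarketTerms.map (fun t => (t, "market_analysis"))

def infer_source_classes_py_alt (query : String) (words : List String) (intent : String) (is_time_sensitive : Bool) : List String :=
  let lowered := PySem.Str.lower query
  -- for term, cls in _SOURCE_CLASS_INDEX.items(): if cls not in hits and term in lowered: hits.append(cls)
  let hits0 := pvSourceClassIndex.foldl
    (fun hits p => if !hits.contains p.2 && PySem.Str.isIn p.1 lowered then hits ++ [p.2] else hits) []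
  let hits1 := if intent == "evidence-seeking" && !hits0.contains "academic" then "academic" :: hits0 else hits0
  let hits2 := if is_time_sensitive then "news" :: hits1 else hits1
  let hits3 := if intent == "comparative" then
      ["official_docs", "market_analysis"].foldl (fun h c => if !h.contains c then h ++ [c] else h) hits2
    else hits2
  if hits3 = [] then [if words.length ≤ 4 then "official_docs" else "news"] else hits3

-- ===== PRECONDITION & SPEC =====
def Spec_infer_source_classes_py (query : String) (words : List String) (intent : String) (is_time_sensitive : Bool) (out : List String) : Prop := out = infer_source_classes_py_alt query words intent is_time_sensitive
instance (query : String) (words : List String) (intent : String) (is_time_sensitive : Bool) (out : List String) : Decidable (Spec_infer_source_classes_py query words intent is_time_sensitive out) := by unfold Spec_infer_source_classes_py; infer_instance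

-- ===== CLAIM (what is proved, stated in full; the proofs are below) =====
def Claim_equal_infer_source_classes_py : Prop := ∀ (query : String) (words : List String) (intent : String) (is_time_sensitive : Bool), Dom_infer_source_classes_py query words intent is_time_sensitive → Spec_infer_source_classes_py query words intent is_time_sensitive (infer_source_classes_py query words intent is_time_sensitive)

-- ===== LEMMAS AND PROOFS =====

-- Once the class `cls` is in `hits`, scanning further terms of the same class changes nothing.
theorem pv_fold_group_done (f : String → Bool) (cls : String) (terms : List String)
    (hits : List String) (h : hits.contains cls = true) :
    (terms.map (fun t => (t, cls))).foldl
      (fun hs p => if !hs.contains p.2 && f p.1 then hs ++ [p.2] else hs) hits = hits := by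
  induction terms with
  | nil => rfl
  | cons t ts ih =>
    simp only [List.map_cons, List.foldl_cons, h, Bool.not_true, Bool.false_and,
      Bool.false_eq_true, if_false]
    exact ih

-- Scanning one class group from a state not yet containing `cls` appends `cls`
-- exactly when some term of the group matches.
theorem pv_fold_group (f : String → Bool) (cls : String) (terms : List String)
    (hits : List String) (h : hits.contains cls = false) :
    (terms.map (fun t => (t, cls))).foldl
      (fun hs p => if !hs.contains p.2 && f p.1 then hs ++ [p.2] else hs) hits
    = hits ++ (if terms.any f then [cls] else []) := by
  induction terms with
  | nil => simp
  | cons t ts ih =>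
    simp only [List.map_cons, List.foldl_cons, List.any_cons, h, Bool.not_false, Bool.true_and]
    by_cases hf : f t = true
    · have hc : (hits ++ [cls]).contains cls = true := by simp
      rw [if_pos hf, pv_fold_group_done f cls ts _ hc, if_pos (by simp [hf])]
    · simp only [Bool.not_eq_true] at hf
      rw [if_neg (by simp [hf]), ih]
      simp [hf]

-- The single index scan equals the three per-class any() tests, in grouped order.
theorem pv_hits0 (f : String → Bool) :
    pvSourceClassIndex.foldl
      (fun hs p => if !hs.contains p.2 && f p.1 then hs ++ [p.2] else hs) []
    = (if pvAcademicTerms.any f then ["academic"] else [])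
      ++ (if pvOfficialTerms.any f then ["official_docs"] else [])
      ++ (if pvMarketTerms.any f then ["market_analysis"] else []) := by
  unfold pvSourceClassIndex
  rw [List.foldl_append, List.foldl_append]
  rw [pv_fold_group f "academic" pvAcademicTerms [] (by rfl)]
  rw [pv_fold_group f "official_docs" pvOfficialTerms _
      (by cases pvAcademicTerms.any f <;> simp)]
  rw [pv_fold_group f "market_analysis" pvMarketTerms _
      (by cases pvAcademicTerms.any f <;> cases pvOfficialTerms.any f <;> simp)]
  simp [List.append_assoc]

-- With the five boolean conditions and the fallback string abstracted, both shapes are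
-- closed computations; each of the 64 cases evaluates by `rfl`.
theorem pv_key (n ev a o m c : Bool) (s : String) :
    (let t0 : List String := []
     let t1 := if n then pvAddSourceClass t0 "news" else t0
     let t2 := if ev || a then pvAddSourceClass t1 "academic" else t1
     let t3 := if o then pvAddSourceClass t2 "official_docs" else t2
     let t4 := if m then pvAddSourceClass t3 "market_analysis" else t3
     let t5 := if c then pvAddSourceClass (pvAddSourceClass t4 "official_docs") "market_analysis" else t4
     if t5 = [] then pvAddSourceClass t5 s else t5)
    =
    (let hits0 := (if a then ["academic"] else [])
        ++ (if o then ["official_docs"] else [])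
        ++ (if m then ["market_analysis"] else [])
     let hits1 := if ev && !hits0.contains "academic" then "academic" :: hits0 else hits0
     let hits2 := if n then "news" :: hits1 else hits1
     let hits3 := if c then
         ["official_docs", "market_analysis"].foldl (fun h x => if !h.contains x then h ++ [x] else h) hits2
       else hits2
     if hits3 = [] then [s] else hits3) := by
  cases n <;> cases ev <;> cases a <;> cases o <;> cases m <;> cases c <;> rfl

-- ===== VERDICT (by name: the statement is the Claim_ definition above) =====
theorem infer_source_classes_py_spec : Claim_equal_infer_source_classes_py := by
  intro query words intent is_time_sensitive _
  unfold Spec_infer_source_classes_py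
  simp only [infer_source_classes_py, infer_source_classes_py_alt]
  rw [pv_hits0 (fun term => PySem.Str.isIn term (PySem.Str.lower query))]
  have := pv_key is_time_sensitive (intent == "evidence-seeking")
      (pvAcademicTerms.any (fun term => PySem.Str.isIn term (PySem.Str.lower query)))
      (pvOfficialTerms.any (fun term => PySem.Str.isIn term (PySem.Str.lower query)))
      (pvMarketTerms.any (fun term => PySem.Str.isIn term (PySem.Str.lower query)))
      (intent == "comparative")
      (if words.length ≤ 4 then "official_docs" else "news")
  simpa using this
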